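-- pv_equiv track=rewrite | github.com/zehan12/headstarter-ai | python_basics/SUM78.py | sum78
-- ===== SOURCE A (Python) =====
-- def sum78(nums):
--     total_sum = 0
--     is_btw = False
--
--     for num in nums:
--         if num == 7:
--             is_btw = True
--         elif num == 8 and is_btw:
--             is_btw = False
--         elif not is_btw:
--             total_sum += num
--
--     return total_sum
-- ===== SOURCE B (Python) =====
-- def sum78(nums):
--     nums = list(nums)
--     total = 0
--     i = 0
--     n = len(nums)
--     while i < n:
--         if nums[i] == 7:
--             i += 1
--             while i < n and nums[i] != 8:
--                 i += 1
--             i += 1  # skip the closing 8 (or step past the end)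
--         else:
--             total += nums[i]
--             i += 1
--     return total
-- ===== Notes on version B (the rewrite author's own statement) =====
-- stated objective: alternative
-- what changed: Replaces the boolean in-span flag and single flat for-loop with an explicit index walk whose inner while-loop consumes a whole 7..8 span at once.
import Mathlib
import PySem

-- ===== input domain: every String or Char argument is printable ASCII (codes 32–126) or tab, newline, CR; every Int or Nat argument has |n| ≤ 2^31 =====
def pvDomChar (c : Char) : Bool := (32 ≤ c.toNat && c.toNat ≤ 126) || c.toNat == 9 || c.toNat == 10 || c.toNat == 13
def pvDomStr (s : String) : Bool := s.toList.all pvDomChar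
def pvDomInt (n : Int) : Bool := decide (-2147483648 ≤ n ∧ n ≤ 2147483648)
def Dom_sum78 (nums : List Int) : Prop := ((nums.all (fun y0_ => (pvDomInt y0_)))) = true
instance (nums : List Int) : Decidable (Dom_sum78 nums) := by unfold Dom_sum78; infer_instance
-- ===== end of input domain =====

-- B replaces A's boolean in-span flag and flat loop by an index walk whose inner loop consumes a whole 7..8 span at once (objective: alternative, same cost).

-- ===== PORT A =====
-- loop body of A's for-loop: state = (total_sum, is_btw)
def sum78Step (st : Int × Bool) (num : Int) : Int × Bool :=
  if num = 7 then (st.1, true)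
  else if num = 8 ∧ st.2 = true then (st.1, false)
  else if st.2 = false then (st.1 + num, st.2)
  else st

def sum78 (nums : List Int) : Int :=
  (nums.foldl sum78Step ((0 : Int), false)).1

-- ===== PORT B =====
-- inner while loop: advance i until nums[i] == 8 or the end
def sum78Skip (nums : List Int) (i : Nat) : Nat :=
  if _h : i < nums.length then
    if nums.getD i 0 = 8 then i else sum78Skip nums (i + 1)
  else i
termination_by nums.length - i

-- the port of B's outer while loop cites this for termination
theorem sum78Skip_ge (nums : List Int) (i : Nat) : i ≤ sum78Skip nums i := by
  fun_induction sum78Skip <;> simp_all <;> omega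

-- outer while loop of B
def sum78Go (nums : List Int) (i : Nat) : Int :=
  if _h : i < nums.length then
    if nums.getD i 0 = 7 then sum78Go nums (sum78Skip nums (i + 1) + 1)
    else nums.getD i 0 + sum78Go nums (i + 1)
  else 0
termination_by nums.length - i
decreasing_by
  · have := sum78Skip_ge nums (i + 1); omega
  · omega

def sum78_alt (nums : List Int) : Int := sum78Go nums 0

-- ===== PRECONDITION & SPEC =====
def Spec_sum78 (nums : List Int) (out : Int) : Prop := out = sum78_alt nums
instance (nums : List Int) (out : Int) : Decidable (Spec_sum78 nums out) := by unfold Spec_sum78; infer_instance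

-- ===== CLAIM (what is proved, stated in full; the proofs are below) =====
def Claim_equal_sum78 : Prop := ∀ (nums : List Int), Dom_sum78 nums → Spec_sum78 nums (sum78 nums)

-- ===== LEMMAS AND PROOFS =====

-- list-level characterisation of B's span skipping
def dropSpan : List Int → List Int
  | [] => []
  | y :: ys => if y = 8 then ys else dropSpan ys

theorem dropSpan_length_le (l : List Int) : (dropSpan l).length ≤ l.length := by
  induction l with
  | nil => simp [dropSpan]
  | cons y ys ih => simp only [dropSpan]; split <;> simp <;> omega

-- list-level characterisation of B's outer loop
def gB : List Int → Int
  | [] => 0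
  | x :: xs => if x = 7 then gB (dropSpan xs) else x + gB xs
termination_by l => l.length
decreasing_by
  · have := dropSpan_length_le xs; simp; omega
  · simp

-- A's fold, with the flag made explicit and the accumulator stripped
def fA : List Int → Bool → Int
  | [], _ => 0
  | x :: xs, b =>
      if x = 7 then fA xs true
      else if x = 8 ∧ b = true then fA xs false
      else if b = false then x + fA xs b
      else fA xs b

theorem foldl_step_eq_fA (l : List Int) : ∀ (t : Int) (b : Bool),
    (l.foldl sum78Step (t, b)).1 = t + fA l b := by
  induction l with
  | nil => intro t b; simp [fA]
  | cons x xs ih =>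
      intro t b
      simp only [List.foldl_cons, sum78Step, fA]
      split_ifs <;> simp_all <;> omega

theorem fA_eq_gB (l : List Int) : fA l false = gB l ∧ fA l true = gB (dropSpan l) := by
  induction l with
  | nil => simp [fA, gB, dropSpan]
  | cons x xs ih =>
      constructor
      · rw [gB]
        simp only [fA]
        split_ifs <;> simp_all
      · simp only [fA, dropSpan]
        split_ifs <;> simp_all [gB]

theorem drop_sum78Skip (nums : List Int) (j : Nat) :
    nums.drop (sum78Skip nums j + 1) = dropSpan (nums.drop j) := by
  fun_induction sum78Skip with
  | case1 i h h8 =>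
      rw [List.drop_eq_getElem_cons h, List.getD_eq_getElem nums 0 h] at *
      simp [dropSpan, h8]
  | case2 i h h8 ih =>
      rw [List.drop_eq_getElem_cons h, List.getD_eq_getElem nums 0 h] at *
      simp [dropSpan, h8, ih]
  | case3 i h =>
      have : nums.length ≤ i := by omega
      rw [List.drop_eq_nil_of_le this, List.drop_eq_nil_of_le (by omega)]
      simp [dropSpan]

theorem sum78Go_eq_gB (nums : List Int) (i : Nat) :
    sum78Go nums i = gB (nums.drop i) := by
  fun_induction sum78Go with
  | case1 i h h7 ih =>
      rw [ih, drop_sum78Skip, List.drop_eq_getElem_cons h]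
      rw [List.getD_eq_getElem nums 0 h] at h7
      rw [gB]; simp [h7]
  | case2 i h h7 ih =>
      rw [ih, List.drop_eq_getElem_cons h]
      rw [List.getD_eq_getElem nums 0 h] at *
      rw [gB]; simp [h7]
  | case3 i h =>
      rw [List.drop_eq_nil_of_le (by omega)]
      simp [gB]

-- ===== VERDICT (by name: the statement is the Claim_ definition above) =====
theorem sum78_spec : Claim_equal_sum78 := by
  intro nums _
  unfold Spec_sum78 sum78 sum78_alt
  rw [foldl_step_eq_fA, (fA_eq_gB nums).1, sum78Go_eq_gB]
  simp
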